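-- pv_equiv track=rewrite | github.com/YannikMarkworth/youtube-processor | classify_videos.py | match_title_to_file
-- ===== SOURCE A (Python) =====
-- def match_title_to_file(title, batch):
--     """Fuzzy-matches an AI-returned title to a file in the batch."""
--     title_lower = title.lower().strip()
--     for item in batch:
--         if item['title'].lower().strip() == title_lower:
--             return item
--     # Partial match fallback
--     for item in batch:
--         if title_lower in item['title'].lower() or item['title'].lower() in title_lower:
--             return item
--     return None
-- ===== SOURCE B (Python) =====
-- def match_title_to_file(title, batch):
--     """Fuzzy-matches an AI-returned title to a file in the batch (single pass)."""
--     title_lower = title.lower().strip()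
--     first_partial = None
--     for item in batch:
--         t = item['title'].lower()
--         if t.strip() == title_lower:
--             return item  # exact match wins immediately
--         if first_partial is None and (title_lower in t or t in title_lower):
--             first_partial = item  # remember earliest partial, keep scanning for an exact match
--     return first_partial
-- ===== Notes on version B (the rewrite author's own statement) =====
-- stated objective: simpler
-- what changed: Replaces A's two full scans (exact pass, then partial pass) with one loop that returns on an exact match and records the first partial match in a single variable, returned after the loop.
import Mathlib
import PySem

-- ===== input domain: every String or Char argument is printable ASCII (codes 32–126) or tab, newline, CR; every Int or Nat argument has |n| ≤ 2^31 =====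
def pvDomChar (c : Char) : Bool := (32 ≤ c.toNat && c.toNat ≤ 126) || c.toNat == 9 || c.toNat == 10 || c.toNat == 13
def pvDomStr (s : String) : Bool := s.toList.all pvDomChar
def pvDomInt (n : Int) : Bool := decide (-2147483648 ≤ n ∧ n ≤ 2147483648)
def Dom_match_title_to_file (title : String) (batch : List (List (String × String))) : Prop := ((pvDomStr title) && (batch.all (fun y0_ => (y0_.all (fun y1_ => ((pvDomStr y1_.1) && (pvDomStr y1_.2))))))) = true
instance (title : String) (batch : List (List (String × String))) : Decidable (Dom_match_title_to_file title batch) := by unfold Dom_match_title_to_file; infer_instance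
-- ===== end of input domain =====

-- B replaces A's two scans over batch with a single loop carrying a first-partial accumulator (simpler, one pass); return-value equivalence, proved for all inputs where A does not raise KeyError.


-- ===== PORT A =====
-- item['title'] (Pre_ guarantees the key is present, so the KeyError branch is unreachable)
def mttfTitleOf (item : List (String × String)) : String :=
  PySem.Dict.getD (PySem.Dict.mk item) "title" ""

-- first loop of A: exact match on lower().strip()
def mttfExact (tl : String) : List (List (String × String)) → Option (List (String × String))
  | [] => none
  | it :: rest =>
      if PySem.Str.strip (PySem.Str.lower (mttfTitleOf it)) = tl then some it
      else mttfExact tl rest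

-- second loop of A: partial (substring either way) match
def mttfPartial (tl : String) : List (List (String × String)) → Option (List (String × String))
  | [] => none
  | it :: rest =>
      if PySem.Str.isIn tl (PySem.Str.lower (mttfTitleOf it))
         || PySem.Str.isIn (PySem.Str.lower (mttfTitleOf it)) tl then some it
      else mttfPartial tl rest

def match_title_to_file (title : String) (batch : List (List (String × String))) : Option (List (String × String)) :=
  let tl := PySem.Str.strip (PySem.Str.lower title)
  match mttfExact tl batch with
  | some it => some it
  | none => mttfPartial tl batch

-- ===== PORT B =====
-- single loop: return on exact match, remember the first partial match in fp
def mttfLoop (tl : String) : List (List (String × String)) → Option (List (String × String)) → Option (List (String × String))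
  | [], fp => fp
  | it :: rest, fp =>
      let t := PySem.Str.lower (mttfTitleOf it)
      if PySem.Str.strip t = tl then some it
      else mttfLoop tl rest
        (if fp.isNone && (PySem.Str.isIn tl t || PySem.Str.isIn t tl) then some it else fp)

def match_title_to_file_alt (title : String) (batch : List (List (String × String))) : Option (List (String × String)) :=
  mttfLoop (PySem.Str.strip (PySem.Str.lower title)) batch none

-- ===== PRECONDITION & SPEC =====
def mttfHasKey (item : List (String × String)) : Bool :=
  PySem.Dict.contains (PySem.Dict.mk item) "title"

-- Pre_ excludes exactly the inputs where A (and B) raises KeyError: some item lacks the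
-- 'title' key AND no exact title match occurs strictly before the first such item.
def Pre_match_title_to_file (title : String) (batch : List (List (String × String))) : Prop :=
  (batch.all mttfHasKey = true) ∨
  ((List.range batch.length).any (fun i =>
      (batch.take (i + 1)).all mttfHasKey &&
      (PySem.Str.strip (PySem.Str.lower (mttfTitleOf (batch.getD i [])))
        == PySem.Str.strip (PySem.Str.lower title))) = true)
instance (title : String) (batch : List (List (String × String))) : Decidable (Pre_match_title_to_file title batch) := by unfold Pre_match_title_to_file; infer_instance

def pvWitness_match_title_to_file : String × (List (List (String × String))) :=
  ("My Video", [[("title", "my video ")], [("title", "other")]])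

def Spec_match_title_to_file (title : String) (batch : List (List (String × String))) (out : Option (List (String × String))) : Prop := out = match_title_to_file_alt title batch
instance (title : String) (batch : List (List (String × String))) (out : Option (List (String × String))) : Decidable (Spec_match_title_to_file title batch out) := by unfold Spec_match_title_to_file; infer_instance

-- ===== CLAIM (what is proved, stated in full; the proofs are below) =====
def Claim_equal_match_title_to_file : Prop := ∀ (title : String) (batch : List (List (String × String))), Dom_match_title_to_file title batch → Pre_match_title_to_file title batch → Spec_match_title_to_file title batch (match_title_to_file title batch)

-- ===== LEMMAS AND PROOFS =====

-- B's loop = A's result, with the accumulator as the fallback when no exact and no earlier partial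
theorem mttfLoop_eq (tl : String) (batch : List (List (String × String))) (fp : Option (List (String × String))) :
    mttfLoop tl batch fp =
      match mttfExact tl batch with
      | some x => some x
      | none => match fp with
                | some p => some p
                | none => mttfPartial tl batch := by
  induction batch generalizing fp with
  | nil => cases fp <;> simp [mttfLoop, mttfExact, mttfPartial]
  | cons it rest ih =>
    by_cases hex : PySem.Str.strip (PySem.Str.lower (mttfTitleOf it)) = tl
    · simp [mttfLoop, mttfExact, hex]
    · by_cases hp : (PySem.Str.isIn tl (PySem.Str.lower (mttfTitleOf it))
          || PySem.Str.isIn (PySem.Str.lower (mttfTitleOf it)) tl) = true <;>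
        simp at hp <;>
        cases fp <;> simp [mttfLoop, mttfExact, mttfPartial, hex, hp, ih] <;>
          cases mttfExact tl rest <;> simp

-- ===== VERDICT (by name: the statement is the Claim_ definition above) =====
theorem match_title_to_file_spec : Claim_equal_match_title_to_file := by
  intro title batch _ _
  unfold Spec_match_title_to_file match_title_to_file match_title_to_file_alt
  rw [mttfLoop_eq]
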